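-- pv_equiv track=rewrite | github.com/lchristie/Sums-of-Roots-of-Unity | support.py | findMaxPrimeIndex
-- ===== SOURCE A (Python) =====
-- import math
--
-- def isPrime(number):
--     if number > 1:
--         if number == 2:
--             return True
--         if number % 2 == 0:
--             return False
--         for current in range(3, int(math.sqrt(number) + 1), 2):
--             if number % current == 0:
--                 return False
--         return True
--     return False
--
-- def getPrimes(number):
--     while True:
--         if isPrime(number):
--             yield number
--         number += 1
--
-- def findNthPrime(n):
--     if n == 0:
--         return 1
--
--     primeGenerator = getPrimes(1)
--
--     for index in range(n - 1):
--         next(primeGenerator)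
--
--     return next(primeGenerator)
--
-- def findMaxPrime (aWeightLimit):
--     index = 0
--     while findNthPrime(index + 1) < aWeightLimit:
--         index += 1
--     return findNthPrime(index)
--
-- def findMaxPrimeIndex (aWeightLimit):
--     ps = findMaxPrime(aWeightLimit)
--     index = 0
--     while findNthPrime(index) != ps:
--         index += 1
--     if findNthPrime(index) == ps:
--         return index
--     else:
--         return False
-- ===== SOURCE B (Python) =====
-- def findMaxPrimeIndex(aWeightLimit):
--     count = 0
--     for k in range(2, aWeightLimit):
--         d = 2
--         while d * d <= k:
--             if k % d == 0:
--                 break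
--             d += 1
--         else:
--             count += 1
--     return count
-- ===== Notes on version B (the rewrite author's own statement) =====
-- stated objective: faster
-- what changed: B makes one increasing scan over 2..limit-1, trial-dividing each candidate once and counting the primes, instead of A's scheme that re-runs the prime generator from scratch for every findNthPrime probe of both while-loops.
import Mathlib
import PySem

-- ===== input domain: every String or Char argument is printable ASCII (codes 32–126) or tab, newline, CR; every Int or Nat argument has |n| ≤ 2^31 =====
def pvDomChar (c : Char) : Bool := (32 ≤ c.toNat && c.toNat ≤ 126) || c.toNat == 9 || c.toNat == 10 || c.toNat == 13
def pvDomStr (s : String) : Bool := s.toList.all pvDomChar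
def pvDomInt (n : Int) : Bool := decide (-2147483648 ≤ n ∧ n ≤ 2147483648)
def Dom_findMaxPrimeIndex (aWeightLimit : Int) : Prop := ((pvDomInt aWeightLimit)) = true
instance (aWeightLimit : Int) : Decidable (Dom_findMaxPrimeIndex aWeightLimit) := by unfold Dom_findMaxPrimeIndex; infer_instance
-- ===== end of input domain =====

-- B replaces A's regenerate-the-prime-sequence-per-probe scheme by one increasing
-- trial-division scan that counts the primes below the limit (objective: faster).
-- A's while-loops are unbounded searches; they are ported as structural recursion on an
-- explicit fuel that is provably sufficient (see the *_spec lemmas below), so each port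
-- computes exactly what its Python computes.

-- ===== PORT A =====

-- 'for current in range(3, int(math.sqrt(number)+1), 2): if number % current == 0: return False' / 'return True'
def isPrimeLoop (number : Int) : List Int → Bool
  | [] => true
  | c :: rest => if PySem.Int.mod number c = 0 then false else isPrimeLoop number rest

-- int(math.sqrt(number) + 1) is ported as Nat.sqrt number + 1: exact for 1 < number ≤ 2^31
-- (the double sqrt of such an int is accurate enough that int(sqrt(n)+1) = ⌊√n⌋ + 1).
def isPrime (number : Int) : Bool :=
  if number > 1 then
    if number = 2 then true
    else if PySem.Int.mod number 2 = 0 then false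
    else isPrimeLoop number (PySem.List.pyRange 3 ((Nat.sqrt number.toNat : Int) + 1) 2)
  else false

-- the generator's 'while True: if isPrime(number): yield number; number += 1' advance,
-- fuel-bounded (searchPrime_found below proves the fuel is never exhausted)
def searchPrimeF : Nat → Int → Int
  | 0, number => number
  | f + 1, number => if isPrime number = true then number else searchPrimeF f (number + 1)

def searchPrime (number : Int) : Int :=
  searchPrimeF (2 * number.toNat + (-number).toNat + 5) number

-- next(primeGenerator): yields searchPrime(state) and the new generator state
def genNext (state : Int) : Int × Int := (searchPrime state, searchPrime state + 1)

def findNthPrime (n : Int) : Int :=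
  if n = 0 then 1
  else (genNext ((PySem.List.pyRange 0 (n - 1) 1).foldl (fun st _ => (genNext st).2) 1)).1

-- 'index = 0; while findNthPrime(index + 1) < aWeightLimit: index += 1', fuel-bounded
-- (the loop runs at most aWeightLimit times since findNthPrime n ≥ n; fNP_ge below)
def fmpLoopF : Nat → Int → Int → Int
  | 0, _, index => index
  | f + 1, aWeightLimit, index =>
      if findNthPrime (index + 1) < aWeightLimit then fmpLoopF f aWeightLimit (index + 1)
      else index

def fmpLoop (aWeightLimit : Int) : Int := fmpLoopF (aWeightLimit.toNat + 1) aWeightLimit 0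

def findMaxPrime (aWeightLimit : Int) : Int := findNthPrime (fmpLoop aWeightLimit)

-- 'index = 0; while findNthPrime(index) != ps: index += 1', fuel-bounded (the loop stops
-- at fmpLoop's own index, where findNthPrime hits ps = findMaxPrime aWeightLimit)
def fmpiLoopF : Nat → Int → Int → Int
  | 0, _, index => index
  | f + 1, ps, index =>
      if findNthPrime index ≠ ps then fmpiLoopF f ps (index + 1) else index

def findMaxPrimeIndex (aWeightLimit : Int) : Int :=
  let ps := findMaxPrime aWeightLimit
  let index := fmpiLoopF ((fmpLoop aWeightLimit).toNat + 1) ps 0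
  -- Python's 'else: return False' is unreachable (the loop exits exactly on equality);
  -- int(False) = 0 stands in for it
  if findNthPrime index = ps then index else 0

-- ===== PORT B =====

-- 'd = 2; while d * d <= k: if k % d == 0: break; d += 1; else: count += 1', fuel-bounded
-- (d can pass k only once, so k.toNat + 1 steps suffice; bTrialF_iff below)
def bTrialF : Nat → Int → Int → Bool
  | 0, _, _ => true
  | f + 1, k, d =>
      if d * d ≤ k then (if PySem.Int.mod k d = 0 then false else bTrialF f k (d + 1)) else true

def findMaxPrimeIndex_alt (aWeightLimit : Int) : Int :=
  (PySem.List.pyRange 2 aWeightLimit 1).foldl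
    (fun count k => if bTrialF (k.toNat + 1) k 2 then count + 1 else count) 0

-- ===== PRECONDITION & SPEC =====
def Spec_findMaxPrimeIndex (aWeightLimit : Int) (out : Int) : Prop := out = findMaxPrimeIndex_alt aWeightLimit
instance (aWeightLimit : Int) (out : Int) : Decidable (Spec_findMaxPrimeIndex aWeightLimit out) := by unfold Spec_findMaxPrimeIndex; infer_instance

-- ===== CLAIM (what is proved, stated in full; the proofs are below) =====
def Claim_equal_findMaxPrimeIndex : Prop := ∀ (aWeightLimit : Int), Dom_findMaxPrimeIndex aWeightLimit → Spec_findMaxPrimeIndex aWeightLimit (findMaxPrimeIndex aWeightLimit)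

-- ===== LEMMAS AND PROOFS =====

theorem isPrimeLoop_iff (n : Int) (l : List Int) :
    isPrimeLoop n l = true ↔ ∀ c ∈ l, ¬ (c ∣ n) := by
  induction l with
  | nil => simp [isPrimeLoop]
  | cons c rest ih =>
      simp only [isPrimeLoop]
      split
      · rename_i h
        rw [PySem.Int.mod_eq_zero_iff_dvd] at h
        simp [h]
      · rename_i h
        rw [PySem.Int.mod_eq_zero_iff_dvd] at h
        simp [ih, h]

theorem isPrime_iff (n : Int) : isPrime n = true ↔ 1 < n ∧ Nat.Prime n.toNat := by
  unfold isPrime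
  split
  case isFalse h => simp only [Bool.false_eq_true, false_iff]; intro hc; omega
  case isTrue h =>
    split
    case isTrue h2 =>
      subst h2
      simp only [true_iff]
      exact ⟨by norm_num, by decide⟩
    case isFalse h2 =>
      split
      case isTrue h3 =>
        simp only [Bool.false_eq_true, false_iff]
        rintro ⟨h1, hp⟩
        have hdvd : (2 : Int) ∣ n := (PySem.Int.mod_eq_zero_iff_dvd n 2).1 h3
        have hdN : 2 ∣ n.toNat := by omega
        have := (Nat.Prime.eq_one_or_self_of_dvd hp 2 hdN)
        omega
      case isFalse h3 =>
        rw [isPrimeLoop_iff]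
        have hodd : ¬ ((2 : Int) ∣ n) := fun hd => h3 ((PySem.Int.mod_eq_zero_iff_dvd n 2).2 hd)
        constructor
        · intro hloop
          refine ⟨h, Nat.prime_def_le_sqrt.2 ⟨by omega, ?_⟩⟩
          intro m hm2 hms hdvd
          have hdInt : (m : Int) ∣ n := by
            have := Int.natCast_dvd_natCast.2 hdvd
            rwa [Int.toNat_of_nonneg (by omega)] at this
          by_cases hme : 2 ∣ m
          · exact hodd (dvd_trans (by exact_mod_cast hme) hdInt)
          · have hm3 : 3 ≤ m := by omega
            refine hloop (m : Int) ?_ hdInt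
            rw [PySem.List.mem_pyRange_iff_of_pos (by norm_num)]
            refine ⟨by exact_mod_cast hm3, by omega, by omega⟩
        · rintro ⟨-, hp⟩ c hc
          rw [PySem.List.mem_pyRange_iff_of_pos (by norm_num)] at hc
          obtain ⟨hc3, hcu, hcd⟩ := hc
          intro hdvd
          have hcN : c.toNat ∣ n.toNat := by
            refine Int.natCast_dvd_natCast.1 ?_
            rwa [Int.toNat_of_nonneg (by omega), Int.toNat_of_nonneg (by omega)]
          exact (Nat.prime_def_le_sqrt.1 hp).2 c.toNat (by omega) (by omega) hcN

theorem prime_isPrime {p : Nat} (hp : p.Prime) : isPrime (p : Int) = true := by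
  rw [isPrime_iff]
  exact ⟨by exact_mod_cast hp.one_lt, by simpa using hp⟩

-- the fuel searchPrime hands to searchPrimeF always contains a prime (via Bertrand)
theorem searchPrime_found (m : Int) :
    ∃ k : Nat, k < 2 * m.toNat + (-m).toNat + 5 ∧ isPrime (m + (k : Int)) = true := by
  by_cases hm : m ≤ 2
  · refine ⟨(2 - m).toNat, by omega, ?_⟩
    have h2 : m + (((2 - m).toNat : Nat) : Int) = 2 := by omega
    rw [h2]
    decide
  · obtain ⟨p, hp, hlt, hle⟩ := Nat.exists_prime_lt_and_le_two_mul m.toNat (by omega)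
    refine ⟨((p : Int) - m).toNat, by omega, ?_⟩
    have h2 : m + ((((p : Int) - m).toNat : Nat) : Int) = (p : Int) := by omega
    rw [h2]
    exact prime_isPrime hp

theorem searchPrimeF_spec (f : Nat) :
    ∀ m : Int, (∃ k : Nat, k < f ∧ isPrime (m + (k : Int)) = true) →
      m ≤ searchPrimeF f m ∧ isPrime (searchPrimeF f m) = true ∧
        ∀ x, m ≤ x → x < searchPrimeF f m → isPrime x = false := by
  induction f with
  | zero => rintro m ⟨k, hk, -⟩; exact absurd hk (by omega)
  | succ f ih =>
      rintro m ⟨k, hk, hkp⟩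
      simp only [searchPrimeF]
      by_cases hm : isPrime m = true
      · rw [if_pos hm]
        exact ⟨le_refl _, hm, fun x hx1 hx2 => by omega⟩
      · rw [if_neg hm]
        have hk0 : k ≠ 0 := by
          intro h0
          rw [h0] at hkp
          simp at hkp
          exact hm (by simpa using hkp)
        have hex : ∃ k' : Nat, k' < f ∧ isPrime ((m + 1) + (k' : Int)) = true := by
          refine ⟨k - 1, by omega, ?_⟩
          have : (m + 1) + ((k - 1 : Nat) : Int) = m + (k : Int) := by omega
          rw [this]
          exact hkp
        obtain ⟨ih1, ih2, ih3⟩ := ih (m + 1) hex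
        refine ⟨by omega, ih2, fun x hx1 hx2 => ?_⟩
        rcases eq_or_lt_of_le hx1 with heq | hlt
        · exact heq ▸ (Bool.eq_false_iff.mpr hm)
        · exact ih3 x (by omega) hx2

theorem searchPrime_spec (m : Int) :
    m ≤ searchPrime m ∧ isPrime (searchPrime m) = true ∧
      ∀ x, m ≤ x → x < searchPrime m → isPrime x = false :=
  searchPrimeF_spec _ m (searchPrime_found m)

theorem foldl_genNext_ge (l : List Int) (init : Int) :
    init + l.length ≤ l.foldl (fun st _ => (genNext st).2) init := by
  induction l generalizing init with
  | nil => simp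
  | cons a rest ih =>
      have h1 : init + 1 ≤ (genNext init).2 := by
        have := (searchPrime_spec init).1
        simp only [genNext]; omega
      have h2 := ih ((genNext init).2)
      simp only [List.foldl_cons, List.length_cons]
      omega

theorem fNP_ge (n : Int) : n ≤ findNthPrime n := by
  unfold findNthPrime
  split
  · omega
  · set X := (PySem.List.pyRange 0 (n - 1) 1).foldl (fun st _ => (genNext st).2) 1 with hX
    have h1 := foldl_genNext_ge (PySem.List.pyRange 0 (n - 1) 1) 1
    rw [PySem.List.length_pyRange_one] at h1
    rw [← hX] at h1
    have h2 := (searchPrime_spec X).1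
    show n ≤ (genNext X).1
    simp only [genNext]
    omega

-- the prime stream A's generator produces, in order
def pseq : Nat → Int
  | 0 => searchPrime 1
  | k + 1 => searchPrime (pseq k + 1)

theorem pseq_prime (k : Nat) : 1 < pseq k ∧ Nat.Prime (pseq k).toNat := by
  have h : isPrime (pseq k) = true := by
    cases k with
    | zero => exact (searchPrime_spec 1).2.1
    | succ k => exact (searchPrime_spec (pseq k + 1)).2.1
  exact (isPrime_iff _).1 h

theorem pseq_lt_succ (k : Nat) : pseq k < pseq (k + 1) := by
  have h := (searchPrime_spec (pseq k + 1)).1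
  show pseq k < searchPrime (pseq k + 1)
  omega

theorem pseq_mono : StrictMono pseq := strictMono_nat_of_lt_succ pseq_lt_succ

theorem count_const_of_no_prime (a b : Nat) (hab : a ≤ b)
    (h : ∀ m, a ≤ m → m < b → ¬ Nat.Prime m) :
    Nat.count Nat.Prime b = Nat.count Nat.Prime a := by
  induction b with
  | zero => have : a = 0 := by omega
            rw [this]
  | succ b ih =>
      rcases eq_or_lt_of_le hab with heq | hlt
      · rw [heq]
      · have hb : a ≤ b := by omega
        rw [Nat.count_succ, if_neg (h b hb (by omega)), ih hb (fun m hm1 hm2 => h m hm1 (by omega))]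
        omega

theorem count_pseq (k : Nat) : Nat.count Nat.Prime (pseq k).toNat = k := by
  induction k with
  | zero =>
      have hsp := searchPrime_spec 1
      have hgt : 1 < searchPrime 1 := ((isPrime_iff _).1 hsp.2.1).1
      have hle : searchPrime 1 ≤ 2 := by
        by_contra hgt2
        have hf := hsp.2.2 2 (by norm_num) (by omega)
        exact absurd hf (by decide)
      have h2 : searchPrime 1 = 2 := by omega
      show Nat.count Nat.Prime (searchPrime 1).toNat = 0
      rw [h2]
      decide
  | succ k ih =>
      have hsp := searchPrime_spec (pseq k + 1)
      have hppr := pseq_prime k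
      have hq := pseq_prime (k + 1)
      have hqe : pseq (k + 1) = searchPrime (pseq k + 1) := rfl
      have h1 : Nat.count Nat.Prime ((pseq k).toNat + 1) = k + 1 := by
        rw [Nat.count_succ, ih, if_pos hppr.2]
      have h2 : Nat.count Nat.Prime (pseq (k + 1)).toNat
          = Nat.count Nat.Prime ((pseq k).toNat + 1) := by
        apply count_const_of_no_prime
        · have := pseq_lt_succ k
          omega
        · intro m hm1 hm2 hmp
          have hfalse := hsp.2.2 (m : Int) (by omega) (by rw [← hqe]; omega)
          rw [prime_isPrime hmp] at hfalse
          exact absurd hfalse (by decide)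
      rw [h2, h1]

theorem count_pseq_succ (k : Nat) : Nat.count Nat.Prime ((pseq k).toNat + 1) = k + 1 := by
  rw [Nat.count_succ, count_pseq, if_pos (pseq_prime k).2]

-- the central counting fact: pseq k < L iff fewer than k+1 primes lie below L
theorem pseq_lt_iff (k : Nat) (L : Int) :
    pseq k < L ↔ (k : Nat) < Nat.count Nat.Prime L.toNat := by
  constructor
  · intro h
    have h1 := count_pseq_succ k
    have hmono := Nat.count_monotone Nat.Prime
      (show (pseq k).toNat + 1 ≤ L.toNat by have := (pseq_prime k).1; omega)
    omega
  · intro h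
    by_contra hge
    push_neg at hge
    have hmono := Nat.count_monotone Nat.Prime
      (show L.toNat ≤ (pseq k).toNat by omega)
    rw [count_pseq] at hmono
    omega

theorem foldl_const_iterate (l : List Int) (f : Int → Int) (init : Int) :
    l.foldl (fun s _ => f s) init = f^[l.length] init := by
  induction l generalizing init with
  | nil => simp
  | cons a t ih => simp [List.foldl_cons, ih, Function.iterate_succ_apply]

theorem searchPrime_iterate (k : Nat) :
    searchPrime ((fun s => searchPrime s + 1)^[k] 1) = pseq k := by
  induction k with
  | zero => rfl
  | succ k ih =>
      rw [Function.iterate_succ_apply']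
      show searchPrime (searchPrime ((fun s => searchPrime s + 1)^[k] 1) + 1) = pseq (k + 1)
      rw [ih]
      rfl

theorem fNP_eq (n : Int) (hn : n ≠ 0) : findNthPrime n = pseq (n - 1).toNat := by
  unfold findNthPrime
  rw [if_neg hn]
  rw [foldl_const_iterate (PySem.List.pyRange 0 (n - 1) 1) (fun st => (genNext st).2) 1]
  simp only [genNext, PySem.List.length_pyRange_one]
  have : (n - 1 - 0).toNat = (n - 1).toNat := by omega
  rw [this]
  exact searchPrime_iterate (n - 1).toNat

theorem fmpLoopF_spec (f : Nat) :
    ∀ (L i : Int), L ≤ i + (f : Int) →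
      i ≤ fmpLoopF f L i ∧ ¬ (findNthPrime (fmpLoopF f L i + 1) < L) ∧
        ∀ j, i ≤ j → j < fmpLoopF f L i → findNthPrime (j + 1) < L := by
  induction f with
  | zero =>
      intro L i hfuel
      simp only [fmpLoopF]
      refine ⟨le_refl _, ?_, fun j hj1 hj2 => by omega⟩
      have := fNP_ge (i + 1)
      omega
  | succ f ih =>
      intro L i hfuel
      simp only [fmpLoopF]
      by_cases hg : findNthPrime (i + 1) < L
      · rw [if_pos hg]
        have hfuel' : L ≤ (i + 1) + (f : Int) := by
          have := fNP_ge (i + 1)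
          omega
        obtain ⟨ih1, ih2, ih3⟩ := ih L (i + 1) hfuel'
        refine ⟨by omega, ih2, fun j hj1 hj2 => ?_⟩
        rcases eq_or_lt_of_le hj1 with heq | hlt
        · exact heq ▸ hg
        · exact ih3 j (by omega) hj2
      · rw [if_neg hg]
        exact ⟨le_refl _, hg, fun j hj1 hj2 => by omega⟩

theorem fmpLoop_spec (L : Int) :
    0 ≤ fmpLoop L ∧ ¬ (findNthPrime (fmpLoop L + 1) < L) ∧
      ∀ j, 0 ≤ j → j < fmpLoop L → findNthPrime (j + 1) < L :=
  fmpLoopF_spec (L.toNat + 1) L 0 (by omega)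

theorem fmpiLoopF_spec (f : Nat) :
    ∀ (ps i : Int), (∃ j : Nat, i ≤ (j : Int) ∧ (j : Int) < i + (f : Int) ∧ findNthPrime (j : Int) = ps) →
      i ≤ fmpiLoopF f ps i ∧ findNthPrime (fmpiLoopF f ps i) = ps ∧
        ∀ x, i ≤ x → x < fmpiLoopF f ps i → findNthPrime x ≠ ps := by
  induction f with
  | zero => rintro ps i ⟨j, hj1, hj2, -⟩; exact absurd hj2 (by omega)
  | succ f ih =>
      rintro ps i ⟨j, hj1, hj2, hj3⟩
      simp only [fmpiLoopF]
      by_cases hg : findNthPrime i ≠ ps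
      · rw [if_pos hg]
        have hij : i + 1 ≤ (j : Int) := by
          rcases eq_or_lt_of_le hj1 with heq | hlt
          · exact absurd (heq ▸ hj3) hg
          · omega
        obtain ⟨ih1, ih2, ih3⟩ := ih ps (i + 1) ⟨j, hij, by omega, hj3⟩
        refine ⟨by omega, ih2, fun x hx1 hx2 => ?_⟩
        rcases eq_or_lt_of_le hx1 with heq | hlt
        · exact heq ▸ hg
        · exact ih3 x (by omega) hx2
      · rw [if_neg hg]
        push_neg at hg
        exact ⟨le_refl _, hg, fun x hx1 hx2 => by omega⟩

theorem A_eq_count (L : Int) : findMaxPrimeIndex L = (Nat.count Nat.Prime L.toNat : Int) := by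
  set c := Nat.count Nat.Prime L.toNat with hcdef
  obtain ⟨hf0, hpost, hpre⟩ := fmpLoop_spec L
  set f := fmpLoop L with hfdef
  have hfc : f = (c : Int) := by
    have h1 : ¬ (pseq f.toNat < L) := by
      rw [fNP_eq (f + 1) (by omega), show (f + 1 - 1).toNat = f.toNat by omega] at hpost
      exact hpost
    have h2 : ¬ (f.toNat < c) := fun hlt => h1 ((pseq_lt_iff f.toNat L).2 hlt)
    have h3 : ¬ ((c : Int) < f) := by
      intro hlt
      have hh := hpre (c : Int) (by positivity) hlt
      rw [fNP_eq ((c : Int) + 1) (by omega),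
        show ((c : Int) + 1 - 1).toNat = c by omega] at hh
      exact absurd ((pseq_lt_iff c L).1 hh) (by omega)
    omega
  simp only [findMaxPrimeIndex]
  have hex : ∃ j : Nat, (0 : Int) ≤ (j : Int) ∧ (j : Int) < 0 + ((f.toNat + 1 : Nat) : Int) ∧
      findNthPrime (j : Int) = findMaxPrime L := by
    refine ⟨f.toNat, by positivity, by push_cast; omega, ?_⟩
    show findNthPrime (f.toNat : Int) = findNthPrime (fmpLoop L)
    rw [show ((f.toNat : Nat) : Int) = fmpLoop L by omega]
  obtain ⟨hr0, hrps, hrmin⟩ := fmpiLoopF_spec ((fmpLoop L).toNat + 1) (findMaxPrime L) 0 hex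
  set r := fmpiLoopF ((fmpLoop L).toNat + 1) (findMaxPrime L) 0 with hrdef
  rw [if_pos hrps]
  have hps : findMaxPrime L = findNthPrime f := rfl
  rcases Nat.eq_zero_or_pos c with hc0 | hcpos
  · -- no prime below L: ps = findNthPrime 0 = 1 and the index loop stops at 0
    have hps1 : findMaxPrime L = 1 := by
      rw [hps, show f = (0 : Int) by omega]
      rfl
    have : ¬ ((0 : Int) < r) := by
      intro hlt
      have := hrmin 0 le_rfl hlt
      rw [show findNthPrime 0 = 1 from rfl, hps1] at this
      exact this rfl
    omega
  · have hps2 : findMaxPrime L = pseq (c - 1) := by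
      rw [hps, hfc, fNP_eq ((c : Int)) (by omega)]
      congr 1
      omega
    have hgt1 : 1 < pseq (c - 1) := (pseq_prime (c - 1)).1
    have hnotlt : ¬ (r < (c : Int)) := by
      intro hlt
      rcases eq_or_lt_of_le hr0 with heq | hpos
      · rw [← heq, show findNthPrime 0 = 1 from rfl, hps2] at hrps
        omega
      · rw [fNP_eq r (by omega), hps2] at hrps
        have := pseq_mono.injective hrps
        omega
    have hnotgt : ¬ ((c : Int) < r) := by
      intro hlt
      have hh := hrmin (c : Int) (by positivity) hlt
      rw [fNP_eq ((c : Int)) (by omega), show ((c : Int) - 1).toNat = c - 1 by omega, hps2] at hh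
      exact hh rfl
    omega

-- ===== B-side lemmas =====

theorem bTrialF_iff (f : Nat) :
    ∀ (k d : Int), 0 ≤ d → k < d + (f : Int) →
      (bTrialF f k d = true ↔ ∀ e : Int, d ≤ e → e * e ≤ k → ¬ (e ∣ k)) := by
  induction f with
  | zero =>
      intro k d hd hfuel
      have hkd : k < d := by omega
      simp only [bTrialF, true_iff]
      intro e he1 he2
      exfalso
      rcases eq_or_lt_of_le (le_trans hd he1) with heq | hpos
      · rw [← heq] at he2; omega
      · have h2 : e ≤ e * e := le_mul_of_one_le_left (by omega) (by omega)
        linarith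
  | succ f ih =>
      intro k d hd hfuel
      simp only [bTrialF]
      by_cases h1 : d * d ≤ k
      · rw [if_pos h1]
        by_cases h2 : PySem.Int.mod k d = 0
        · rw [if_pos h2]
          simp only [Bool.false_eq_true, false_iff]
          intro hall
          exact hall d le_rfl h1 ((PySem.Int.mod_eq_zero_iff_dvd k d).1 h2)
        · rw [if_neg h2]
          rw [ih k (d + 1) (by omega) (by omega)]
          constructor
          · intro hall e he1 he2
            rcases eq_or_lt_of_le he1 with heq | hlt
            · intro hdvd
              exact h2 ((PySem.Int.mod_eq_zero_iff_dvd k d).2 (heq ▸ hdvd))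
            · exact hall e (by omega) he2
          · intro hall e he1 he2
            exact hall e (by omega) he2
      · rw [if_neg h1]
        simp only [true_iff]
        intro e he1 he2
        exfalso
        have h2 : d * d ≤ e * e := mul_le_mul he1 he1 hd (le_trans hd he1)
        linarith

theorem bTrial_eq_prime (k : Int) (hk : 2 ≤ k) :
    bTrialF (k.toNat + 1) k 2 = true ↔ Nat.Prime k.toNat := by
  rw [bTrialF_iff (k.toNat + 1) k 2 (by norm_num) (by omega), Nat.prime_def_le_sqrt]
  constructor
  · intro hall
    refine ⟨by omega, fun m hm2 hms hdvd => ?_⟩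
    have hmInt : (m : Int) ∣ k := by
      have := Int.natCast_dvd_natCast.2 hdvd
      rwa [Int.toNat_of_nonneg (by omega)] at this
    refine hall (m : Int) (by exact_mod_cast hm2) ?_ hmInt
    have h1 := Nat.le_sqrt.1 hms
    have h2 : ((m * m : Nat) : Int) ≤ ((k.toNat : Nat) : Int) := by exact_mod_cast h1
    push_cast at h2
    omega
  · rintro ⟨h2k, hnd⟩ e he1 he2 hdvd
    have heN : e.toNat ∣ k.toNat := by
      refine Int.natCast_dvd_natCast.1 ?_
      rwa [Int.toNat_of_nonneg (by omega), Int.toNat_of_nonneg (by omega)]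
    refine hnd e.toNat (by omega) ?_ heN
    rw [Nat.le_sqrt]
    have h2 : ((e.toNat : Nat) : Int) * ((e.toNat : Nat) : Int) ≤ ((k.toNat : Nat) : Int) := by
      rw [Int.toNat_of_nonneg (by omega), Int.toNat_of_nonneg (by omega)]
      exact he2
    exact_mod_cast h2

theorem foldl_count_int {α : Type} (l : List α) (p : α → Bool) (init : Int) :
    l.foldl (fun c x => if p x then c + 1 else c) init = init + (l.countP p : Int) := by
  induction l generalizing init with
  | nil => simp
  | cons a t ih =>
      by_cases hp : p a <;> simp [hp, ih] <;> push_cast <;> ring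

theorem count_add_range (a n : Nat) :
    Nat.count Nat.Prime (a + n)
      = Nat.count Nat.Prime a + (List.range n).countP (fun k => decide (Nat.Prime (a + k))) := by
  induction n with
  | zero => simp
  | succ n ih =>
      rw [show a + (n + 1) = (a + n) + 1 by omega, Nat.count_succ, ih, List.range_succ,
        List.countP_append]
      by_cases hp : Nat.Prime (a + n) <;> simp [hp] <;> omega

theorem B_eq_count (L : Int) : findMaxPrimeIndex_alt L = (Nat.count Nat.Prime L.toNat : Int) := by
  unfold findMaxPrimeIndex_alt
  by_cases hL : L ≤ 2
  · rw [PySem.List.pyRange_one_eq_nil (by omega)]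
    have hmono := Nat.count_monotone Nat.Prime (show L.toNat ≤ 2 by omega)
    have hc2 : Nat.count Nat.Prime 2 = 0 := by decide
    simp only [List.foldl_nil]
    omega
  · rw [PySem.List.pyRange_one, List.foldl_map, foldl_count_int]
    have hcong : ∀ k ∈ List.range (L - 2).toNat,
        ((bTrialF (((2 : Int) + (k : Int)).toNat + 1) ((2 : Int) + (k : Int)) 2) = true ↔
          (fun k => decide (Nat.Prime (2 + k))) k = true) := by
      intro k _
      have h := bTrial_eq_prime ((2 : Int) + (k : Int)) (by omega)
      rw [show ((2 : Int) + (k : Int)).toNat = 2 + k from by omega] at h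
      simpa using h
    rw [List.countP_congr hcong]
    have hshift := count_add_range 2 (L - 2).toNat
    have heq : 2 + (L - 2).toNat = L.toNat := by omega
    rw [heq] at hshift
    have hc2 : Nat.count Nat.Prime 2 = 0 := by decide
    omega

-- ===== VERDICT (by name: the statement is the Claim_ definition above) =====
theorem findMaxPrimeIndex_spec : Claim_equal_findMaxPrimeIndex := by
  intro L _
  unfold Spec_findMaxPrimeIndex
  rw [A_eq_count, B_eq_count]
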